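-- pv_equiv track=rewrite | github.com/AmroEwes/Course-Eligibility-and-Recommendation-System | Streamlit_App_8.py | is_eligible_special_eng_edu_
-- ===== SOURCE A (Python) =====
-- def is_eligible_special_eng_edu_(course, taken_courses, student_info,prerequisites,conditions):
--     prereqs = prerequisites.get(course, [])
--     condition = conditions.get(course, "")
--
--     if condition == "OR":
--         return any(prereq in taken_courses for prereq in prereqs)
--     elif condition == "AND":
--         return all(prereq in taken_courses for prereq in prereqs)
--     elif condition == "AND_EDU":
--         return all(prereq in taken_courses for prereq in prereqs) and student_info['Major'] == "English Education"
--     elif condition == "AND_UENG":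
--         return all(prereq in taken_courses for prereq in prereqs) and student_info['Program'] == "English"
--     elif condition == "OR_AND_Program_OR":
--         return any(prereq in taken_courses for prereq in prereqs) and (student_info['Program'] == "Mass Communication" or student_info['Program'] == "English")
--     elif condition == "Any_Three":
--         return sum(prereq in taken_courses for prereq in prereqs) >= 3
--     else:
--         return False
-- ===== SOURCE B (Python) =====
-- # Declarative rules table: condition -> (min satisfied prereqs or None meaning "all",
-- # optional (student_info key, allowed values)). One generic evaluator replaces the branch chain.
-- RULES = {
--     "OR": (1, None),
--     "AND": (None, None),
--     "AND_EDU": (None, ("Major", ("English Education",))),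
--     "AND_UENG": (None, ("Program", ("English",))),
--     "OR_AND_Program_OR": (1, ("Program", ("Mass Communication", "English"))),
--     "Any_Three": (3, None),
-- }
--
-- def is_eligible_special_eng_edu_(course, taken_courses, student_info, prerequisites, conditions):
--     rule = RULES.get(conditions.get(course, ""))
--     if rule is None:
--         return False
--     need, extra = rule
--     prereqs = prerequisites.get(course, [])
--     if need is None:
--         need = len(prereqs)
--     if sum(p in taken_courses for p in prereqs) < need:
--         return False
--     if extra is None:
--         return True
--     key, allowed = extra
--     return student_info[key] in allowed
-- ===== Notes on version B (the rewrite author's own statement) =====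
-- stated objective: alternative
-- what changed: B replaces A's six-way branch chain with per-branch any/all/sum scans by a declarative rules table (condition -> required count or 'all', plus an optional student_info key/allowed-values requirement) and one generic evaluator that counts satisfied prerequisites once and checks the rule; student_info is only consulted after the quorum holds, so KeyError behaviour is unchanged.
import Mathlib
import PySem

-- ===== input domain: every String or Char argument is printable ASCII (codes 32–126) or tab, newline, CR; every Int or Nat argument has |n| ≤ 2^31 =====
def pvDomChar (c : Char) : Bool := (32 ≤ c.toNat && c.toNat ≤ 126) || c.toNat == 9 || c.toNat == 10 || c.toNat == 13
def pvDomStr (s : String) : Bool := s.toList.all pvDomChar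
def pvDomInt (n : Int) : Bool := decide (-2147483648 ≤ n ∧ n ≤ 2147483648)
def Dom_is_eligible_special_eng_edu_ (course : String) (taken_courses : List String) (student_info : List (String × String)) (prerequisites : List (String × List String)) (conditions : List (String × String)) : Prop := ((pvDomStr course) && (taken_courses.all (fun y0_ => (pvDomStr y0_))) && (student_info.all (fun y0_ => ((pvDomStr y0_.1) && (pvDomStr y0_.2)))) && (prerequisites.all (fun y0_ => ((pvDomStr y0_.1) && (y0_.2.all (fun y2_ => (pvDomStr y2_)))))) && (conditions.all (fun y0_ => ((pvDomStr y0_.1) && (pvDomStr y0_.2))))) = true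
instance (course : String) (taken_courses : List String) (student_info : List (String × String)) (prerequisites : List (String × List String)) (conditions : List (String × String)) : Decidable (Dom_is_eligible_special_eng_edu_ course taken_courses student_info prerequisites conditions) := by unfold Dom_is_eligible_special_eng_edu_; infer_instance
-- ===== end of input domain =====

-- B replaces A's branch chain by a declarative rules table plus one generic evaluator
-- (objective: alternative decomposition; same cost).

-- ===== PORT A =====
def is_eligible_special_eng_edu_ (course : String) (taken_courses : List String) (student_info : List (String × String)) (prerequisites : List (String × List String)) (conditions : List (String × String)) : Bool :=
  let prereqs := (List.lookup course prerequisites).getD []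
  let condition := (List.lookup course conditions).getD ""
  if condition = "OR" then
    prereqs.any (fun prereq => taken_courses.contains prereq)
  else if condition = "AND" then
    prereqs.all (fun prereq => taken_courses.contains prereq)
  else if condition = "AND_EDU" then
    -- under Pre_ the 'Major' key exists whenever this conjunct is evaluated in Python
    prereqs.all (fun prereq => taken_courses.contains prereq) &&
      ((List.lookup "Major" student_info).getD "" == "English Education")
  else if condition = "AND_UENG" then
    prereqs.all (fun prereq => taken_courses.contains prereq) &&
      ((List.lookup "Program" student_info).getD "" == "English")
  else if condition = "OR_AND_Program_OR" then
    prereqs.any (fun prereq => taken_courses.contains prereq) &&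
      (((List.lookup "Program" student_info).getD "" == "Mass Communication") ||
       ((List.lookup "Program" student_info).getD "" == "English"))
  else if condition = "Any_Three" then
    decide (3 ≤ prereqs.countP (fun prereq => taken_courses.contains prereq))
  else
    false

-- ===== PORT B =====
-- the module-level RULES dict of Source B: condition -> (required count, none = all; optional (key, allowed values))
def pvRULES : List (String × (Option Nat × Option (String × List String))) :=
  [ ("OR", (some 1, none)),
    ("AND", (none, none)),
    ("AND_EDU", (none, some ("Major", ["English Education"]))),
    ("AND_UENG", (none, some ("Program", ["English"]))),
    ("OR_AND_Program_OR", (some 1, some ("Program", ["Mass Communication", "English"]))),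
    ("Any_Three", (some 3, none)) ]

def is_eligible_special_eng_edu__alt (course : String) (taken_courses : List String) (student_info : List (String × String)) (prerequisites : List (String × List String)) (conditions : List (String × String)) : Bool :=
  match List.lookup ((List.lookup course conditions).getD "") pvRULES with
  | none => false
  | some (needOpt, extra) =>
    let prereqs := (List.lookup course prerequisites).getD []
    let need := needOpt.getD prereqs.length
    if prereqs.countP (fun p => taken_courses.contains p) < need then false
    else
      match extra with
      | none => true
      -- under Pre_ the key exists whenever this line is reached in Python
      | some (key, allowed) => allowed.contains ((List.lookup key student_info).getD "")

-- ===== PRECONDITION & SPEC =====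
-- Pre_ excludes exactly the inputs on which Python A raises KeyError: the condition is
-- AND_EDU / AND_UENG / OR_AND_Program_OR, the prerequisite test before the 'and' is
-- true, and the needed student_info key ('Major' resp. 'Program') is missing.
def Pre_is_eligible_special_eng_edu_ (course : String) (taken_courses : List String) (student_info : List (String × String)) (prerequisites : List (String × List String)) (conditions : List (String × String)) : Prop :=
  let prereqs := (List.lookup course prerequisites).getD []
  let condition := (List.lookup course conditions).getD ""
  (condition = "AND_EDU" → prereqs.all (fun p => taken_courses.contains p) = true → (List.lookup "Major" student_info).isSome = true) ∧
  (condition = "AND_UENG" → prereqs.all (fun p => taken_courses.contains p) = true → (List.lookup "Program" student_info).isSome = true) ∧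
  (condition = "OR_AND_Program_OR" → prereqs.any (fun p => taken_courses.contains p) = true → (List.lookup "Program" student_info).isSome = true)
instance (course : String) (taken_courses : List String) (student_info : List (String × String)) (prerequisites : List (String × List String)) (conditions : List (String × String)) : Decidable (Pre_is_eligible_special_eng_edu_ course taken_courses student_info prerequisites conditions) := by unfold Pre_is_eligible_special_eng_edu_; infer_instance

def pvWitness_is_eligible_special_eng_edu_ : String × List String × (List (String × String)) × (List (String × List String)) × (List (String × String)) :=
  ("C1", ["P1"], [("Major", "English Education")], [("C1", ["P1"])], [("C1", "AND_EDU")])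

def Spec_is_eligible_special_eng_edu_ (course : String) (taken_courses : List String) (student_info : List (String × String)) (prerequisites : List (String × List String)) (conditions : List (String × String)) (out : Bool) : Prop := out = is_eligible_special_eng_edu__alt course taken_courses student_info prerequisites conditions
instance (course : String) (taken_courses : List String) (student_info : List (String × String)) (prerequisites : List (String × List String)) (conditions : List (String × String)) (out : Bool) : Decidable (Spec_is_eligible_special_eng_edu_ course taken_courses student_info prerequisites conditions out) := by unfold Spec_is_eligible_special_eng_edu_; infer_instance

-- ===== CLAIM (what is proved, stated in full; the proofs are below) =====
def Claim_equal_is_eligible_special_eng_edu_ : Prop := ∀ (course : String) (taken_courses : List String) (student_info : List (String × String)) (prerequisites : List (String × List String)) (conditions : List (String × String)), Dom_is_eligible_special_eng_edu_ course taken_courses student_info prerequisites conditions → Pre_is_eligible_special_eng_edu_ course taken_courses student_info prerequisites conditions → Spec_is_eligible_special_eng_edu_ course taken_courses student_info prerequisites conditions (is_eligible_special_eng_edu_ course taken_courses student_info prerequisites conditions)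

-- ===== LEMMAS AND PROOFS =====
theorem any_eq_not_lt_one (l : List String) (f : String → Bool) :
    l.any f = !decide (l.countP f < 1) := by
  induction l with
  | nil => simp
  | cons x xs ih =>
    by_cases h : f x = true <;> simp [List.countP_cons, h, ih]

theorem all_eq_not_lt_len (l : List String) (f : String → Bool) :
    l.all f = !decide (l.countP f < l.length) := by
  induction l with
  | nil => simp
  | cons x xs ih =>
    have hle := List.countP_le_length (p := f) (l := xs)
    by_cases h : f x = true
    · simp only [List.all_cons, h, Bool.true_and, List.countP_cons, h, if_pos, ih,
        List.length_cons]
      congr 1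
      simp only [decide_eq_decide]
      omega
    · simp only [List.all_cons, h, Bool.false_and, List.countP_cons, h, if_neg, List.length_cons]
      have : (xs.countP f < xs.length + 1) := by omega
      simp [this]

-- ===== VERDICT (by name: the statement is the Claim_ definition above) =====
theorem is_eligible_special_eng_edu__spec : Claim_equal_is_eligible_special_eng_edu_ := by
  intro course taken_courses student_info prerequisites conditions _ _
  show _ = _
  unfold is_eligible_special_eng_edu_ is_eligible_special_eng_edu__alt pvRULES
  by_cases h1 : (List.lookup course conditions).getD "" = "OR"
  · simp [h1, List.lookup, any_eq_not_lt_one]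
  by_cases h2 : (List.lookup course conditions).getD "" = "AND"
  · simp [h2, List.lookup, all_eq_not_lt_len]
  by_cases h3 : (List.lookup course conditions).getD "" = "AND_EDU"
  · simp [h3, List.lookup, all_eq_not_lt_len, beq_eq_decide, eq_comm]
  by_cases h4 : (List.lookup course conditions).getD "" = "AND_UENG"
  · simp [h4, List.lookup, all_eq_not_lt_len, beq_eq_decide, eq_comm]
  by_cases h5 : (List.lookup course conditions).getD "" = "OR_AND_Program_OR"
  · simp [h5, List.lookup, any_eq_not_lt_one, beq_eq_decide, eq_comm]
  by_cases h6 : (List.lookup course conditions).getD "" = "Any_Three"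
  · simp only [h6, List.lookup, String.reduceEq, reduceIte, String.reduceBEq, Option.getD_some]
    by_cases hq : List.countP (fun p => taken_courses.contains p)
        ((List.lookup course prerequisites).getD []) < 3
    · simp only [if_pos hq, decide_eq_false_iff_not]
      omega
    · simp only [if_neg hq, decide_eq_true_eq]
      omega
  · have b1 : ((List.lookup course conditions).getD "" == "OR") = false := by simp [h1]
    have b2 : ((List.lookup course conditions).getD "" == "AND") = false := by simp [h2]
    have b3 : ((List.lookup course conditions).getD "" == "AND_EDU") = false := by simp [h3]
    have b4 : ((List.lookup course conditions).getD "" == "AND_UENG") = false := by simp [h4]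
    have b5 : ((List.lookup course conditions).getD "" == "OR_AND_Program_OR") = false := by
      simp [h5]
    have b6 : ((List.lookup course conditions).getD "" == "Any_Three") = false := by simp [h6]
    simp [h1, h2, h3, h4, h5, h6, List.lookup, b1, b2, b3, b4, b5, b6]
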